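-- pv_equiv track=rewrite | github.com/jabocg/igpayatinlay | igpayatinlay.py | _split_into_parts
-- ===== SOURCE A (Python) =====
-- _VOWELS = 'a e i o u'.split()
--
-- _PUNCTUATION_MARKS = ', . : ! " ?'.split()
--
-- def _split_into_parts(string):
--     first_vowel = -1
--     punctuation = -1
--     for i, c in enumerate(string):
--         if c in _VOWELS and first_vowel == -1:
--             first_vowel = i
--         elif c in _PUNCTUATION_MARKS and punctuation == -1:
--             punctuation = i
--             break
--     if first_vowel == -1:
--         first_vowel = 0
--     if punctuation == -1:
--         punctuation = len(string)
--     return (string[:first_vowel],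
--             string[first_vowel:punctuation],
--             string[punctuation:])
-- ===== SOURCE B (Python) =====
-- _VOWELS = 'a e i o u'.split()
--
-- _PUNCTUATION_MARKS = ', . : ! " ?'.split()
--
--
-- def _split_into_parts(string):
--     # two separate searches: first punctuation over the whole string,
--     # then first vowel restricted to the prefix before that punctuation
--     p = next((i for i, c in enumerate(string) if c in _PUNCTUATION_MARKS),
--              len(string))
--     v = next((i for i, c in enumerate(string[:p]) if c in _VOWELS), 0)
--     return (string[:v], string[v:p], string[p:])
-- ===== Notes on version B (the rewrite author's own statement) =====
-- stated objective: alternative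
-- what changed: Replaces the single fused loop with mutable state and break by two independent searches: first-punctuation index over the whole string, then first-vowel index over the prefix before it, followed by the same three-way slice.
import Mathlib
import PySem

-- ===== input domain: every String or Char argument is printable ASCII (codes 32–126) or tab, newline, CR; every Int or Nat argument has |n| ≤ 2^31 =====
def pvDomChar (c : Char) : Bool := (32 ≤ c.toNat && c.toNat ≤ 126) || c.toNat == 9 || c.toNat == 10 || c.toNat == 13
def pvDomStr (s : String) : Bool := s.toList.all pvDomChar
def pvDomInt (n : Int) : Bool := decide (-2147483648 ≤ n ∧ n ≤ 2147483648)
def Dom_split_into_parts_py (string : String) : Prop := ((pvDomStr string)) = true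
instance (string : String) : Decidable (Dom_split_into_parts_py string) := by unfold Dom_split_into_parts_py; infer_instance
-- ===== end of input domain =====

-- B replaces A's fused loop-with-break by two independent index searches (alternative decomposition, same cost).

-- ===== PORT A =====
def pvIsVowel (c : Char) : Bool := c == 'a' || c == 'e' || c == 'i' || c == 'o' || c == 'u'

def pvIsPunct (c : Char) : Bool := c == ',' || c == '.' || c == ':' || c == '!' || c == '"' || c == '?'

-- the 'for i, c in enumerate(string)' loop of A, with its break and its two flags
def pvLoopA : List Char → Nat → Int → Int → Int × Int
  | [], _, fv, p => (fv, p)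
  | c :: rest, i, fv, p =>
    if pvIsVowel c && fv == -1 then pvLoopA rest (i + 1) (Int.ofNat i) p
    else if pvIsPunct c && p == -1 then (fv, Int.ofNat i)   -- break
    else pvLoopA rest (i + 1) fv p

def split_into_parts_py (string : String) : String × String × String :=
  let cs := string.toList
  let r := pvLoopA cs 0 (-1) (-1)
  let first_vowel := if r.1 = -1 then 0 else r.1
  let punctuation := if r.2 = -1 then (cs.length : Int) else r.2
  (String.ofList (PySem.List.slice cs none (some first_vowel)),
   String.ofList (PySem.List.slice cs (some first_vowel) (some punctuation)),
   String.ofList (PySem.List.slice cs (some punctuation) none))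

-- ===== PORT B =====
-- 'next((i for i, c in enumerate(xs) if pred c), default handled by caller)'
def pvFirstIdx (pred : Char → Bool) : List Char → Nat → Option Nat
  | [], _ => none
  | c :: rest, i => if pred c then some i else pvFirstIdx pred rest (i + 1)

def split_into_parts_py_alt (string : String) : String × String × String :=
  let cs := string.toList
  let p := (pvFirstIdx pvIsPunct cs 0).getD cs.length
  let v := (pvFirstIdx pvIsVowel (cs.take p) 0).getD 0
  (String.ofList (cs.take v), String.ofList ((cs.drop v).take (p - v)), String.ofList (cs.drop p))

-- ===== PRECONDITION & SPEC =====
def Spec_split_into_parts_py (string : String) (out : String × String × String) : Prop := out = split_into_parts_py_alt string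
instance (string : String) (out : String × String × String) : Decidable (Spec_split_into_parts_py string out) := by unfold Spec_split_into_parts_py; infer_instance

-- ===== CLAIM (what is proved, stated in full; the proofs are below) =====
def Claim_equal_split_into_parts_py : Prop := ∀ (string : String), Dom_split_into_parts_py string → Spec_split_into_parts_py string (split_into_parts_py string)

-- ===== LEMMAS AND PROOFS =====

-- vowels and A's punctuation marks are disjoint
theorem pvVowel_not_punct (c : Char) (h : pvIsVowel c = true) : pvIsPunct c = false := by
  simp [pvIsVowel] at h
  rcases h with (((h | h) | h) | h) | h <;> subst h <;> decide

-- once the vowel flag is set, A's loop only searches for the first punctuation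
theorem pvLoopA_set (cs : List Char) : ∀ (i : Nat) (fv : Int), fv ≠ -1 →
    pvLoopA cs i fv (-1) =
      (fv, match pvFirstIdx pvIsPunct cs i with
           | some j => Int.ofNat j
           | none => -1) := by
  induction cs with
  | nil => intro i fv h; simp [pvLoopA, pvFirstIdx]
  | cons c rest ih =>
    intro i fv h
    by_cases hp : pvIsPunct c = true
    · simp [pvLoopA, pvFirstIdx, hp, h]
    · simp [pvLoopA, pvFirstIdx, hp, h, ih (i + 1) fv h]

-- A's loop from the initial (-1, -1) state, characterised by B's two searches
theorem pvLoopA_eq (cs : List Char) : ∀ (i : Nat),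
    pvLoopA cs i (-1) (-1) =
      (match pvFirstIdx pvIsVowel (cs.takeWhile (fun c => !pvIsPunct c)) i with
       | some j => Int.ofNat j
       | none => -1,
       match pvFirstIdx pvIsPunct cs i with
       | some j => Int.ofNat j
       | none => -1) := by
  induction cs with
  | nil => intro i; simp [pvLoopA, pvFirstIdx]
  | cons c rest ih =>
    intro i
    by_cases hv : pvIsVowel c = true
    · have hp := pvVowel_not_punct c hv
      have hfv : ((i : Int)) ≠ -1 := by omega
      simp [pvLoopA, pvFirstIdx, hv, hp, List.takeWhile]
      rw [pvLoopA_set rest (i + 1) ((i : Int)) hfv]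
      rfl
    · by_cases hp : pvIsPunct c = true
      · simp [pvLoopA, pvFirstIdx, hv, hp, List.takeWhile]
      · simp [pvLoopA, pvFirstIdx, hv, hp, List.takeWhile, ih (i + 1)]

-- shifting the start index of the search shifts the found index
theorem pvFirstIdx_shift (pred : Char → Bool) (cs : List Char) : ∀ (i : Nat),
    pvFirstIdx pred cs (i + 1) = (pvFirstIdx pred cs i).map (· + 1) := by
  induction cs with
  | nil => intro i; simp [pvFirstIdx]
  | cons c rest ih =>
    intro i
    by_cases h : pred c = true <;> simp [pvFirstIdx, h, ih (i + 1)]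

-- the prefix before the first punctuation is exactly the takeWhile prefix
theorem pvTakeWhile_eq_take (cs : List Char) :
    cs.takeWhile (fun c => !pvIsPunct c) = cs.take ((pvFirstIdx pvIsPunct cs 0).getD cs.length) := by
  induction cs with
  | nil => simp
  | cons c rest ih =>
    by_cases h : pvIsPunct c = true
    · simp [List.takeWhile, h, pvFirstIdx]
    · simp [List.takeWhile, h, pvFirstIdx, pvFirstIdx_shift, ih]

-- a found index is bounded by the list length
theorem pvFirstIdx_le (pred : Char → Bool) (cs : List Char) : ∀ (i j : Nat),
    pvFirstIdx pred cs i = some j → i ≤ j ∧ j < i + cs.length := by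
  induction cs with
  | nil => intro i j h; simp [pvFirstIdx] at h
  | cons c rest ih =>
    intro i j h
    by_cases hc : pred c = true
    · simp [pvFirstIdx, hc] at h; simp only [List.length_cons]; omega
    · simp [pvFirstIdx, hc] at h
      have := ih (i + 1) j h
      simp; omega

theorem split_parts_eq (string : String) :
    split_into_parts_py string = split_into_parts_py_alt string := by
  simp only [split_into_parts_py, split_into_parts_py_alt]
  rw [pvLoopA_eq string.toList 0, pvTakeWhile_eq_take]
  set cs := string.toList with hcs
  set p := (pvFirstIdx pvIsPunct cs 0).getD cs.length with hp
  have hple : p ≤ cs.length := by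
    rw [hp]
    cases hfp : pvFirstIdx pvIsPunct cs 0 with
    | none => simp
    | some j => have := pvFirstIdx_le pvIsPunct cs 0 j hfp; simp; omega
  have hpInt : (if (match pvFirstIdx pvIsPunct cs 0 with
       | some j => Int.ofNat j
       | none => (-1 : Int)) = -1 then (cs.length : Int)
      else (match pvFirstIdx pvIsPunct cs 0 with
       | some j => Int.ofNat j
       | none => (-1 : Int))) = (p : Int) := by
    rw [hp]; cases pvFirstIdx pvIsPunct cs 0 with
    | none => simp
    | some j => simp
  set v := (pvFirstIdx pvIsVowel (cs.take p) 0).getD 0 with hv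
  have hvInt : (if (match pvFirstIdx pvIsVowel (cs.take p) 0 with
       | some j => Int.ofNat j
       | none => (-1 : Int)) = -1 then (0 : Int)
      else (match pvFirstIdx pvIsVowel (cs.take p) 0 with
       | some j => Int.ofNat j
       | none => (-1 : Int))) = (v : Int) := by
    rw [hv]; cases pvFirstIdx pvIsVowel (cs.take p) 0 with
    | none => simp
    | some j => simp
  simp only [hpInt, hvInt]
  rw [PySem.List.slice_to_natCast, PySem.List.slice_natCast, PySem.List.slice_from_natCast]

-- ===== VERDICT (by name: the statement is the Claim_ definition above) =====
theorem split_into_parts_py_spec : Claim_equal_split_into_parts_py := by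
  intro string _
  show _ = _
  exact split_parts_eq string
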